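-- pv_equiv track=rewrite | github.com/Tsuchinotama/LoL_Simulator | Worlds_Simulator/Worlds_2020_Simulator/Lol_Worlds2020_Simulator_full_head_to_head.py | affect_play_in_team
-- ===== SOURCE A (Python) =====
-- team_regions = {"TES" : "CHN", "JDG" : "CHN", "SN" : "CHN", "LGD" : "CHN", "G2" : "EU", "FNC" : "EU", "RGE" : "EU", "MAD" : "EU", "DWG" : "KR", "DRX" : "KR", "GEN" : "KR", "TSM" : "NA", "FLY" : "NA", "TL" : "NA", "MCX" : "PCS", "PSG" : "PCS", "LGC" : "OCE", "SUP" : "TUR", "INZ" : "BRE", "V3" : "JPN", "UOL" : "RUS", "R7" : "LAT"}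
--
-- wild_card = ["OCE", "TUR", "BRE", "JPN", "RUS", "LAT"]
--
-- list_main_groups_init = [["G2", "SN", "MCX"], ["DWG", "JDG", "RGE"], ["TSM", "GEN", "FNC"], ["TES", "DRX", "FLY"]]
--
-- def affect_play_in_team(list_teams, affects_group) :
--     wild_card_teams = []
--     compatibilities = {}
--
--     for team in list_teams :
--         compatibilities[team] = []
--         region = team_regions[team]
--         if region in wild_card :
--             for i in range(4) :
--                 compatibilities[team].append(i)
--         else :
--             for i in range(4) :
--                 group = list_main_groups_init[i].copy()
--                 for group_team in group :
--                     if region == team_regions[group_team] :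
--                         break
--
--                 else :
--                     compatibilities[team].append(i)
--     list_all_affects = []
--     generate_all_affectations(list(compatibilities.items()), affects_group, list_all_affects)
--     return list_all_affects
--
-- def generate_all_affectations(compatibilities, current_affect, list_all_affects) :
--     if group_already_affected(current_affect) :
--         return False
--
--     if len(compatibilities) == 0 :
--         list_all_affects.append(current_affect)
--         return True
--
--     team_comp = compatibilities[0]
--     for num_group in team_comp[1] :
--         copy_current_affect = current_affect.copy()
--         copy_current_affect.append((team_comp[0], num_group))
--         generate_all_affectations(compatibilities[1:], copy_current_affect, list_all_affects)
--
-- def group_already_affected(current_affect) :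
--     list_num_group = list(range(4))
--     for affect in current_affect :
--         if not affect[1] in list_num_group :
--             return True
--         else :
--             list_num_group.remove(affect[1])
--     else :
--         return False
-- ===== SOURCE B (Python) =====
-- # B: builds per-team compatibility lists in one pass (dedup keeping first occurrence),
-- # then enumerates candidates with itertools.product and keeps those whose full group
-- # assignment (including affects_group) is distinct and inside 0..3 - no recursion.
-- import itertools
--
-- team_regions = {"TES" : "CHN", "JDG" : "CHN", "SN" : "CHN", "LGD" : "CHN", "G2" : "EU", "FNC" : "EU", "RGE" : "EU", "MAD" : "EU", "DWG" : "KR", "DRX" : "KR", "GEN" : "KR", "TSM" : "NA", "FLY" : "NA", "TL" : "NA", "MCX" : "PCS", "PSG" : "PCS", "LGC" : "OCE", "SUP" : "TUR", "INZ" : "BRE", "V3" : "JPN", "UOL" : "RUS", "R7" : "LAT"}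
-- wild_card = ["OCE", "TUR", "BRE", "JPN", "RUS", "LAT"]
-- list_main_groups_init = [["G2", "SN", "MCX"], ["DWG", "JDG", "RGE"], ["TSM", "GEN", "FNC"], ["TES", "DRX", "FLY"]]
--
-- def _is_valid(candidate):
--     groups = [g for _, g in candidate]
--     return all(g in range(4) for g in groups) and len(set(groups)) == len(groups)
--
-- def affect_play_in_team(list_teams, affects_group):
--     comp_lists = []
--     seen = set()
--     for team in list_teams:
--         if team in seen:
--             continue
--         seen.add(team)
--         region = team_regions[team]
--         if region in wild_card:
--             comp_lists.append((team, list(range(4))))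
--         else:
--             comp_lists.append((team, [i for i in range(4)
--                                       if all(region != team_regions[t]
--                                              for t in list_main_groups_init[i])]))
--     return [cand
--             for combo in itertools.product(*(gs for _, gs in comp_lists))
--             for cand in [affects_group + [(t, g) for (t, _), g in zip(comp_lists, combo)]]
--             if _is_valid(cand)]
-- ===== Notes on version B (the rewrite author's own statement) =====
-- stated objective: alternative
-- what changed: Replaces A's recursive pruning backtracker (and its removal-based distinctness check) with a flat enumeration: collect each distinct team's compatibility list in one pass, enumerate all choices itertools.product-style, and keep a candidate iff its full group assignment is pairwise distinct and within 0..3 (set-size check).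
import Mathlib
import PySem

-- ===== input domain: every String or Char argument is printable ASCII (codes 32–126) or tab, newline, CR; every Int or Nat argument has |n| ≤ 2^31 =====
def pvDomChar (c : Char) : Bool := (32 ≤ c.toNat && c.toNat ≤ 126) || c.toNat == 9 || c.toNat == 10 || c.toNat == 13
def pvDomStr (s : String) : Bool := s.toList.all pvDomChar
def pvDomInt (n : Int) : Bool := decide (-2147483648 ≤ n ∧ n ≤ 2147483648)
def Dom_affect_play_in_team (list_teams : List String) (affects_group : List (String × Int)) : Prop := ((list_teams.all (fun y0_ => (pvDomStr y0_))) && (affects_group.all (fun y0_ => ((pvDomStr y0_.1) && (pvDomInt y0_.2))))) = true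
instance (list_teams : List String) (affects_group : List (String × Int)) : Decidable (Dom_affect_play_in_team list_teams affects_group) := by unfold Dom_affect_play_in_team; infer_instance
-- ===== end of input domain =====

-- B replaces A's recursive backtracking by itertools.product over per-team
-- compatibility lists plus a single validity filter (alternative decomposition).


-- shared module-level constants
def teamRegions : PySem.Dict String String := PySem.Dict.ofList
  [("TES", "CHN"), ("JDG", "CHN"), ("SN", "CHN"), ("LGD", "CHN"), ("G2", "EU"),
   ("FNC", "EU"), ("RGE", "EU"), ("MAD", "EU"), ("DWG", "KR"), ("DRX", "KR"),
   ("GEN", "KR"), ("TSM", "NA"), ("FLY", "NA"), ("TL", "NA"), ("MCX", "PCS"),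
   ("PSG", "PCS"), ("LGC", "OCE"), ("SUP", "TUR"), ("INZ", "BRE"), ("V3", "JPN"),
   ("UOL", "RUS"), ("R7", "LAT")]

def wildCard : List String := ["OCE", "TUR", "BRE", "JPN", "RUS", "LAT"]

def mainGroupsInit : List (List String) :=
  [["G2", "SN", "MCX"], ["DWG", "JDG", "RGE"], ["TSM", "GEN", "FNC"], ["TES", "DRX", "FLY"]]

-- ===== PORT A =====
-- team_regions[team]: raises KeyError for unknown teams; Pre_ excludes those
-- inputs, so the "" default is never reached on the claimed domain.

-- one iteration of A's compatibility-building loop over list_teams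
def compatStepA (d : PySem.Dict String (List Int)) (team : String) : PySem.Dict String (List Int) :=
  let d := d.insert team []                                 -- compatibilities[team] = []
  let region := teamRegions.getD team ""
  if wildCard.contains region then
    (PySem.List.pyRange 0 4 1).foldl (fun d i => d.modify team [] (· ++ [i])) d
  else
    (PySem.List.pyRange 0 4 1).foldl (fun d i =>
      -- for group_team in group: if region == …: break / else: append(i)
      -- (for-else: the append runs iff no group member triggered the break)
      let group := PySem.List.pyGetD mainGroupsInit i []    -- list_main_groups_init[i].copy()
      if group.any (fun gt => region == teamRegions.getD gt "") then d
      else d.modify team [] (· ++ [i])) d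

-- group_already_affected's loop; avail is list_num_group.  list.remove is
-- PySem.List.remove?; it is only reached when `affect[1] in list_num_group`,
-- so the getD fallback is never taken.
def gaLoop (affects : List (String × Int)) (avail : List Int) : Bool :=
  match affects with
  | [] => false
  | a :: rest =>
    if !(avail.contains a.2) then true
    else gaLoop rest ((PySem.List.remove? avail a.2).getD avail)

def group_already_affected (current_affect : List (String × Int)) : Bool :=
  gaLoop current_affect (PySem.List.pyRange 0 4 1)          -- list(range(4))

mutual
-- generate_all_affectations (the mutated list_all_affects is the accumulator acc)
def genAll (compatibilities : List (String × List Int)) (current_affect : List (String × Int))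
    (acc : List (List (String × Int))) : List (List (String × Int)) :=
  if group_already_affected current_affect then acc
  else
    match compatibilities with
    | [] => acc ++ [current_affect]
    | (t, gs) :: rest => genLoop rest t gs current_affect acc
termination_by (compatibilities.length, 0)

-- the `for num_group in team_comp[1]` loop
def genLoop (rest : List (String × List Int)) (t : String) (gs : List Int)
    (current_affect : List (String × Int)) (acc : List (List (String × Int))) :
    List (List (String × Int)) :=
  match gs with
  | [] => acc
  | g :: gs' => genLoop rest t gs' current_affect (genAll rest (current_affect ++ [(t, g)]) acc)
termination_by (rest.length, gs.length + 1)
end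

def affect_play_in_team (list_teams : List String) (affects_group : List (String × Int)) : List (List (String × Int)) :=
  let compatibilities := list_teams.foldl compatStepA PySem.Dict.empty
  genAll compatibilities.items affects_group []

-- ===== PORT B =====
-- same KeyError remark as for A: the "" default is unreachable under Pre_.

def isValidB (candidate : List (String × Int)) : Bool :=
  let groups := candidate.map (·.2)
  groups.all (fun g => (PySem.List.pyRange 0 4 1).contains g)
    && ((PySem.Set.ofList groups).length == groups.length)

-- B's single compatibility-building pass with the `seen` set
def buildStepB (st : List (String × List Int) × PySem.Set String) (team : String) :
    List (String × List Int) × PySem.Set String :=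
  if PySem.Set.contains st.2 team then st
  else
    let seen := PySem.Set.add st.2 team
    let region := teamRegions.getD team ""
    if wildCard.contains region then (st.1 ++ [(team, PySem.List.pyRange 0 4 1)], seen)
    else (st.1 ++ [(team, (PySem.List.pyRange 0 4 1).filter
           (fun i => (PySem.List.pyGetD mainGroupsInit i []).all
             (fun t => region != teamRegions.getD t "")))], seen)

-- itertools.product over the collected lists (lexicographic nested-loop order)
def pyProduct : List (List Int) → List (List Int)
  | [] => [[]]
  | gs :: rest => gs.flatMap (fun g => (pyProduct rest).map (g :: ·))

def affect_play_in_team_alt (list_teams : List String) (affects_group : List (String × Int)) : List (List (String × Int)) :=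
  let comp_lists := (list_teams.foldl buildStepB ([], PySem.Set.empty)).1
  ((pyProduct (comp_lists.map (·.2))).map
    (fun combo => affects_group ++ (comp_lists.zip combo).map (fun p => (p.1.1, p.2)))).filter isValidB

-- ===== PRECONDITION & SPEC =====
-- Pre_ excludes exactly the inputs where `team_regions[team]` raises KeyError
-- in A (a team name outside the literal dict).
def Pre_affect_play_in_team (list_teams : List String) (affects_group : List (String × Int)) : Prop :=
  (list_teams.all (fun t => teamRegions.contains t)) = true
instance (list_teams : List String) (affects_group : List (String × Int)) : Decidable (Pre_affect_play_in_team list_teams affects_group) := by unfold Pre_affect_play_in_team; infer_instance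

def pvWitness_affect_play_in_team : List String × (List (String × Int)) :=
  (["LGC", "G2"], [("DWG", 1)])

def Spec_affect_play_in_team (list_teams : List String) (affects_group : List (String × Int)) (out : List (List (String × Int))) : Prop := out = affect_play_in_team_alt list_teams affects_group
instance (list_teams : List String) (affects_group : List (String × Int)) (out : List (List (String × Int))) : Decidable (Spec_affect_play_in_team list_teams affects_group out) := by unfold Spec_affect_play_in_team; infer_instance

-- ===== CLAIM (what is proved, stated in full; the proofs are below) =====
def Claim_equal_affect_play_in_team : Prop := ∀ (list_teams : List String) (affects_group : List (String × Int)), Dom_affect_play_in_team list_teams affects_group → Pre_affect_play_in_team list_teams affects_group → Spec_affect_play_in_team list_teams affects_group (affect_play_in_team list_teams affects_group)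

-- ===== LEMMAS AND PROOFS (all helpers below are proof-only) =====


-- the value A (and B) associates to a team
def valB (team : String) : List Int :=
  let region := teamRegions.getD team ""
  if wildCard.contains region then PySem.List.pyRange 0 4 1
  else (PySem.List.pyRange 0 4 1).filter
    (fun i => (PySem.List.pyGetD mainGroupsInit i []).all
      (fun t => region != teamRegions.getD t ""))

theorem ofList_len_iff (xs : List Int) : (PySem.Set.ofList xs).length = xs.length ↔ xs.Nodup := by
  constructor
  · intro h
    have h1 : (PySem.Set.ofList xs).toFinset = xs.toFinset := by ext a; simp [PySem.Set.mem_ofList]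
    have h2 := PySem.Set.nodup_ofList (α := Int) xs
    have h3 : xs.dedup.length = xs.length := by
      rw [← List.card_toFinset, ← h1, List.toFinset_card_of_nodup h2, h]
    rw [← List.dedup_eq_self]
    exact (List.dedup_sublist xs).eq_of_length h3
  · intro h; rw [PySem.Set.ofList_eq_self_of_nodup xs h]

-- characterization of A's group_already_affected loop
theorem gaLoop_eq_false_iff (affects : List (String × Int)) (avail : List Int) (h : avail.Nodup) :
    gaLoop affects avail = false ↔
      (affects.map (·.2)).Nodup ∧ ∀ g ∈ affects.map (·.2), g ∈ avail := by
  induction affects generalizing avail with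
  | nil => simp [gaLoop]
  | cons a rest ih =>
    by_cases hm : a.2 ∈ avail
    · rw [gaLoop]
      have hc : avail.contains a.2 = true := by simpa using hm
      rw [PySem.List.remove?_eq_some_erase avail a.2 hm]
      simp only [hc, Bool.not_true, Bool.false_eq_true, if_false, Option.getD_some]
      rw [ih _ (h.erase a.2)]
      simp only [List.map_cons, List.nodup_cons, List.mem_cons]
      constructor
      · rintro ⟨hn, hall⟩
        have hnotin : a.2 ∉ rest.map (·.2) := by
          intro hin
          have := hall _ hin
          exact ((List.Nodup.mem_erase_iff h).mp this).1 rfl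
        refine ⟨⟨hnotin, hn⟩, ?_⟩
        rintro g (rfl | hg)
        · exact hm
        · exact ((List.Nodup.mem_erase_iff h).mp (hall g hg)).2
      · rintro ⟨⟨hnotin, hn⟩, hall⟩
        refine ⟨hn, fun g hg => ?_⟩
        rw [List.Nodup.mem_erase_iff h]
        exact ⟨fun e => hnotin (e ▸ hg), hall g (Or.inr hg)⟩
    · rw [gaLoop]
      have hc : avail.contains a.2 = false := by simpa using hm
      simp only [hc, Bool.not_false, if_true]
      constructor
      · intro hF; exact absurd hF (by simp)
      · rintro ⟨-, hall⟩
        exact absurd (hall a.2 (by simp)) hm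

theorem isValidB_iff (cand : List (String × Int)) :
    isValidB cand = true ↔
      (cand.map (·.2)).Nodup ∧ ∀ g ∈ cand.map (·.2), g ∈ ([0, 1, 2, 3] : List Int) := by
  unfold isValidB
  have hr : PySem.List.pyRange 0 4 1 = ([0, 1, 2, 3] : List Int) := by decide
  rw [hr]
  simp only [Bool.and_eq_true, List.all_eq_true, beq_iff_eq]
  rw [ofList_len_iff]
  constructor
  · rintro ⟨hall, hn⟩; exact ⟨hn, fun g hg => by simpa using hall g hg⟩
  · rintro ⟨hn, hall⟩; exact ⟨fun g hg => by simpa using hall g hg, hn⟩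

theorem ga_eq_not_isValidB (cand : List (String × Int)) :
    group_already_affected cand = !(isValidB cand) := by
  have hr : PySem.List.pyRange 0 4 1 = ([0, 1, 2, 3] : List Int) := by decide
  have h := gaLoop_eq_false_iff cand ([0, 1, 2, 3] : List Int) (by decide)
  unfold group_already_affected
  rw [hr]
  cases hv : isValidB cand
  · simp only [Bool.not_false]
    cases hg : gaLoop cand [0, 1, 2, 3]
    · have := isValidB_iff cand |>.mpr (h.mp hg)
      rw [hv] at this; exact absurd this (by simp)
    · rfl
  · simp only [Bool.not_true]
    exact h.mpr ((isValidB_iff cand).mp hv)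

theorem isValidB_prefix (cur xs : List (String × Int)) (h : isValidB (cur ++ xs) = true) :
    isValidB cur = true := by
  rw [isValidB_iff] at h ⊢
  rw [List.map_append] at h
  exact ⟨h.1.of_append_left, fun g hg => h.2 g (List.mem_append_left _ hg)⟩

-- B's candidate builder, named for the proofs
def mkCand (cur : List (String × Int)) (comps : List (String × List Int)) (c : List Int) :
    List (String × Int) :=
  cur ++ (comps.zip c).map (fun p => (p.1.1, p.2))

theorem mkCand_cons (cur : List (String × Int)) (t : String) (gs : List Int)
    (rest : List (String × List Int)) (g : Int) (c : List Int) :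
    mkCand cur ((t, gs) :: rest) (g :: c) = mkCand (cur ++ [(t, g)]) rest c := by
  simp [mkCand]

theorem genLoop_eq (rest : List (String × List Int)) (t : String) (gs : List Int)
    (cur : List (String × Int)) (acc : List (List (String × Int)))
    (IH : ∀ cur acc, genAll rest cur acc =
      acc ++ ((pyProduct (rest.map (·.2))).map (mkCand cur rest)).filter isValidB) :
    genLoop rest t gs cur acc =
      acc ++ gs.flatMap (fun g =>
        ((pyProduct (rest.map (·.2))).map (mkCand (cur ++ [(t, g)]) rest)).filter isValidB) := by
  induction gs generalizing acc with
  | nil => simp [genLoop]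
  | cons g gs' ih =>
    rw [genLoop, IH, ih]
    simp [List.append_assoc]

theorem genAll_eq (comps : List (String × List Int)) (cur : List (String × Int))
    (acc : List (List (String × Int))) :
    genAll comps cur acc =
      acc ++ ((pyProduct (comps.map (·.2))).map (mkCand cur comps)).filter isValidB := by
  induction comps generalizing cur acc with
  | nil =>
    rw [genAll, ga_eq_not_isValidB]
    cases hv : isValidB cur
    · simp [pyProduct, mkCand, hv]
    · simp [pyProduct, mkCand, hv]
  | cons p rest ih =>
    obtain ⟨t, gs⟩ := p
    rw [genAll, ga_eq_not_isValidB]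
    cases hv : isValidB cur
    · simp only [Bool.not_false, if_true]
      have hnil : (((pyProduct (((t, gs) :: rest).map (·.2))).map
          (mkCand cur ((t, gs) :: rest))).filter isValidB) = [] := by
        rw [List.filter_eq_nil_iff]
        intro a ha
        obtain ⟨c, _, rfl⟩ := List.mem_map.mp ha
        intro hvalid
        have := isValidB_prefix cur _ (by simpa [mkCand] using hvalid)
        rw [hv] at this; simp at this
      rw [hnil, List.append_nil]
    · simp only [Bool.not_true, Bool.false_eq_true, if_false]
      rw [genLoop_eq rest t gs cur acc ih]
      simp only [pyProduct, List.map_cons, List.map_flatMap, List.map_map,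
        List.filter_flatMap, Function.comp_def, mkCand_cons]

theorem modify_eq_insert (d : PySem.Dict String (List Int)) (k : String) (f : List Int → List Int) :
    d.modify k [] f = d.insert k (f (d.getD k [])) :=
  PySem.Dict.ext_iff.mpr rfl

theorem foldl_modify (l : List Int) (k : String) (d₀ : PySem.Dict String (List Int)) (v : List Int) :
    l.foldl (fun d i => d.modify k [] (· ++ [i])) (d₀.insert k v) = d₀.insert k (v ++ l) := by
  induction l generalizing v with
  | nil => simp [List.foldl]
  | cons i l ih =>
    rw [List.foldl_cons, modify_eq_insert, PySem.Dict.getD_insert_self,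
      PySem.Dict.insert_insert_self, ih]
    simp

theorem foldl_cond_modify (l : List Int) (cond : Int → Bool) (k : String)
    (d₀ : PySem.Dict String (List Int)) (v : List Int) :
    l.foldl (fun d i => if cond i then d else d.modify k [] (· ++ [i])) (d₀.insert k v)
      = d₀.insert k (v ++ l.filter (fun i => !cond i)) := by
  induction l generalizing v with
  | nil => simp [List.foldl]
  | cons i l ih =>
    rw [List.foldl_cons]
    cases hc : cond i
    · simp only [Bool.false_eq_true, if_false]
      rw [modify_eq_insert, PySem.Dict.getD_insert_self, PySem.Dict.insert_insert_self, ih]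
      simp [hc]
    · simp only [if_true]
      rw [ih]
      simp [hc]

theorem all_bne_eq_not_any_beq (region : String) (l : List String) :
    (l.all (fun t => region != teamRegions.getD t ""))
      = !(l.any (fun gt => region == teamRegions.getD gt "")) := by
  induction l with
  | nil => rfl
  | cons x l ih =>
    rw [List.all_cons, List.any_cons, ih]
    simp [bne, Bool.not_or]

theorem compatStepA_eq (d : PySem.Dict String (List Int)) (team : String) :
    compatStepA d team = d.insert team (valB team) := by
  unfold compatStepA valB
  have hp : (fun i => (PySem.List.pyGetD mainGroupsInit i []).all
        (fun t => teamRegions.getD team "" != teamRegions.getD t ""))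
      = (fun i => !((PySem.List.pyGetD mainGroupsInit i []).any
        (fun gt => teamRegions.getD team "" == teamRegions.getD gt ""))) :=
    funext fun i => all_bne_eq_not_any_beq _ _
  cases hw : wildCard.contains (teamRegions.getD team "")
  · simp only [hw, Bool.false_eq_true, if_false, hp]
    rw [foldl_cond_modify (PySem.List.pyRange 0 4 1)
      (fun i => (PySem.List.pyGetD mainGroupsInit i []).any
        (fun gt => teamRegions.getD team "" == teamRegions.getD gt "")) team d []]
    simp
  · simp only [hw, if_true]
    rw [foldl_modify]
    simp

theorem insert_valB_self (d : PySem.Dict String (List Int)) (team : String)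
    (hc : d.contains team = true)
    (hval : ∀ p ∈ d.items, p.2 = valB p.1) :
    d.insert team (valB team) = d := by
  apply PySem.Dict.ext
  rw [PySem.Dict.items_insert_of_contains d (valB team) hc]
  have : ∀ p ∈ d.items, (if p.1 == team then (team, valB team) else p) = p := by
    intro p hp
    by_cases he : p.1 = team
    · simp only [he, beq_self_eq_true, if_true]
      rw [← he, ← hval p hp]
    · simp [he]
  rw [List.map_congr_left this]; simp

theorem build_eq (lt : List String) (d : PySem.Dict String (List Int))
    (hnd : d.keys.Nodup) (hval : ∀ p ∈ d.items, p.2 = valB p.1) :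
    lt.foldl buildStepB (d.items, d.keys)
      = ((lt.foldl (fun d t => d.insert t (valB t)) d).items,
         (lt.foldl (fun d t => d.insert t (valB t)) d).keys) := by
  induction lt generalizing d with
  | nil => rfl
  | cons team lt ih =>
    rw [List.foldl_cons, List.foldl_cons]
    by_cases hm : team ∈ d.keys
    · have hc : d.contains team = true := by
        rw [PySem.Dict.contains_eq_decide_mem_keys]; simpa using hm
      have hb : buildStepB (d.items, d.keys) team = (d.items, d.keys) := by
        unfold buildStepB
        have hthis : PySem.Set.contains d.keys team = true := by
          simpa [PySem.Set.contains_eq_listContains] using hm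
        simp only [hthis, if_true]
      rw [hb, insert_valB_self d team hc hval, ih d hnd hval]
    · have hc : d.contains team = false := by
        rw [PySem.Dict.contains_eq_decide_mem_keys]; simpa using hm
      have hadd : PySem.Set.add d.keys team = d.keys ++ [team] := PySem.Set.add_of_not_mem hm
      have hb : buildStepB (d.items, d.keys) team
          = (d.items ++ [(team, valB team)], d.keys ++ [team]) := by
        unfold buildStepB
        have hsc : PySem.Set.contains d.keys team = false := by
          rw [PySem.Set.contains_eq_listContains]; simpa using hm
        simp only [hsc, Bool.false_eq_true, if_false, hadd]
        unfold valB
        cases hw : wildCard.contains (teamRegions.getD team "") <;>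
          simp only [hw, Bool.false_eq_true, if_false, if_true]
      rw [hb]
      have hitems := PySem.Dict.items_insert_of_not_contains d (valB team) hc
      have hkeys := PySem.Dict.keys_insert_of_not_contains d (valB team) hc
      rw [← hitems, ← hkeys]
      refine ih _ (PySem.Dict.nodup_keys_insert d team (valB team) hnd) ?_
      intro p hp
      rw [hitems] at hp
      rcases List.mem_append.mp hp with h | h
      · exact hval p h
      · simp at h; subst h; rfl

theorem foldA_eq (lt : List String) (d : PySem.Dict String (List Int)) :
    lt.foldl compatStepA d = lt.foldl (fun d t => d.insert t (valB t)) d := by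
  induction lt generalizing d with
  | nil => rfl
  | cons team lt ih => rw [List.foldl_cons, List.foldl_cons, compatStepA_eq, ih]

theorem affect_eq (lt : List String) (ag : List (String × Int)) :
    affect_play_in_team lt ag = affect_play_in_team_alt lt ag := by
  unfold affect_play_in_team affect_play_in_team_alt
  rw [foldA_eq, genAll_eq]
  have hb := build_eq lt PySem.Dict.empty (by simp [PySem.Dict.keys_empty])
    (by intro p hp
        have h0 : p ∈ ([] : List (String × List Int)) := hp
        simp at h0)
  have : (lt.foldl buildStepB ([], PySem.Set.empty)).1
      = (lt.foldl (fun d t => d.insert t (valB t)) PySem.Dict.empty).items := by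
    rw [show (([], PySem.Set.empty) : List (String × List Int) × PySem.Set String)
      = (PySem.Dict.empty.items, (PySem.Dict.empty : PySem.Dict String (List Int)).keys) from rfl, hb]
  rw [this]
  congr 1

-- ===== VERDICT (by name: the statement is the Claim_ definition above) =====
theorem affect_play_in_team_spec : Claim_equal_affect_play_in_team := by
  intro list_teams affects_group _ _
  unfold Spec_affect_play_in_team
  exact affect_eq list_teams affects_group
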